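-- pv_equiv track=rewrite | github.com/kauatiezzi/speech | jogo.py | process_voice_command
-- ===== SOURCE A (Python) =====
-- import unicodedata
--
-- def _normalize_ascii(texto: str) -> str:
--     if not texto: return ""
--     return unicodedata.normalize('NFKD', texto).encode('ascii', 'ignore').decode('ascii').lower()
--
-- def process_voice_command(command: str):
--     """
--     Processa uma string de transcrição de voz e retorna uma lista de comandos canônicos identificados.
--     Esta versão é mais robusta, detectando comandos como substrings dentro das palavras faladas.
--     Ex: "fogos" ativa "fogo", "queimando" ativa "queimar" (que mapeia para "fogo").
--     """
--     if not command:
--         return []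
--
--     comandos_map = {
--         "fogo": ["fogo", "fire", "chama", "queimar"],
--         "gelo": ["gelo", "ice", "congelar", "frio"],
--         "raio": ["raio", "thunder", "trovao", "eletrico", "relampago", "rai"],
--         "comecar": ["comecar", "iniciar", "start", "jogar"],
--         "pontuacao": ["pontuacao", "scores", "placar"],
--         "voltar": ["voltar", "menu", "retornar"],
--         "parar": ["parar", "stop", "sair", "quit"]
--     }
--
--     # Cria um mapa reverso para busca eficiente: {"fogo": "fogo", "fire": "fogo", ...}
--     sinonimo_map = {s: cmd for cmd, sl in comandos_map.items() for s in sl}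
--     # Obtém uma lista de todos os sinônimos únicos para iterar
--     todos_sinonimos = list(sinonimo_map.keys())
--
--     # Normaliza e divide a entrada de voz
--     palavras_faladas = _normalize_ascii(command).split()
--     comandos_identificados = []
--
--     # Itera sobre cada palavra dita pelo jogador
--     for palavra in palavras_faladas:
--         # Para cada palavra, verifica se algum sinônimo corresponde como substring
--         for sinonimo in todos_sinonimos:
--             # A MUDANÇA PRINCIPAL:
--             # Em vez de 'if palavra == sinonimo', usamos 'if sinonimo in palavra'.
--             if sinonimo in palavra:
--                 # Adiciona o comando principal correspondente (ex: "fogo")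
--                 comandos_identificados.append(sinonimo_map[sinonimo])
--                 # Encontrou uma correspondência para esta 'palavra', então
--                 # quebra o loop interno e vai para a próxima 'palavra' falada.
--                 # Isso evita adicionar o mesmo comando duas vezes para uma única palavra (ex: "fogofogo").
--                 break
--
--     return comandos_identificados
-- ===== SOURCE B (Python) =====
-- import unicodedata
--
-- def _normalize_ascii(texto: str) -> str:
--     if not texto: return ""
--     return unicodedata.normalize('NFKD', texto).encode('ascii', 'ignore').decode('ascii').lower()
--
-- _COMANDOS = [
--     ("fogo", ["fogo", "fire", "chama", "queimar"]),
--     ("gelo", ["gelo", "ice", "congelar", "frio"]),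
--     ("raio", ["raio", "thunder", "trovao", "eletrico", "relampago", "rai"]),
--     ("comecar", ["comecar", "iniciar", "start", "jogar"]),
--     ("pontuacao", ["pontuacao", "scores", "placar"]),
--     ("voltar", ["voltar", "menu", "retornar"]),
--     ("parar", ["parar", "stop", "sair", "quit"]),
-- ]
--
-- # hash index: synonym -> its priority (position in the flattened synonym order),
-- # and priority -> canonical command
-- _PRIO = {}
-- _CMDS = []
-- for _cmd, _syns in _COMANDOS:
--     for _s in _syns:
--         _PRIO[_s] = len(_CMDS)
--         _CMDS.append(_cmd)
--
-- _MAXLEN = max(map(len, _PRIO))  # no key is longer than this, so longer substrings cannot hit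
--
-- def process_voice_command(command: str):
--     """Inverted matching: instead of testing every synonym against each spoken word,
--     enumerate the word's substrings and look them up in a hash index; the hit with
--     the lowest priority (= earliest synonym in the original order) decides the
--     command appended for that word."""
--     result = []
--     for word in _normalize_ascii(command).split():
--         best = None
--         for i in range(len(word)):
--             for j in range(i + 1, min(i + _MAXLEN, len(word)) + 1):
--                 p = _PRIO.get(word[i:j])
--                 if p is not None and (best is None or p < best):
--                     best = p
--         if best is not None:
--             result.append(_CMDS[best])
--     return result
-- ===== Notes on version B (the rewrite author's own statement) =====
-- stated objective: alternative
-- what changed: Inverts the matching direction: instead of scanning the ordered synonym list against each spoken word, B enumerates the word's substrings (up to the longest key) and looks them up in a synonym-to-priority hash index, emitting the command of the lowest-priority hit (same winner because priorities follow the original synonym order).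
import Mathlib
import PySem

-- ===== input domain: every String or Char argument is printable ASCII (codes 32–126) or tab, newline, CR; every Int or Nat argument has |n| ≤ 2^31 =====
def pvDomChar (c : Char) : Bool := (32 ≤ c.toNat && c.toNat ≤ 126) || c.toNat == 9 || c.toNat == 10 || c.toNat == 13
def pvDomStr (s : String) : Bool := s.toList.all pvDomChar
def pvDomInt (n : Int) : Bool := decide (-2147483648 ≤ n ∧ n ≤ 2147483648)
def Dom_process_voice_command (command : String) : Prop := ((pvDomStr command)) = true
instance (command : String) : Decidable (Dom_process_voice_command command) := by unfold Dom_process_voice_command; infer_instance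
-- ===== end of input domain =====

-- B replaces A's per-word scan over the flattened synonym list by the inverse lookup: it
-- enumerates each word's substrings and looks them up in a synonym→priority hash index,
-- the lowest-priority hit winning (objective: alternative algorithm, same cost class).
-- On the ASCII domain _normalize_ascii is exactly lowercasing (NFKD + ascii-encode is the
-- identity there), ported as PySem.Str.lower; str.split() is PySem.Str.split₀.

-- ===== PORT A =====
-- the reverse map {synonym: command} built by A's dict comprehension (synonyms are unique,
-- so the comprehension yields exactly these pairs in this order)
def pvSinMap : List (String × String) :=
  [("fogo","fogo"),("fire","fogo"),("chama","fogo"),("queimar","fogo"),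
   ("gelo","gelo"),("ice","gelo"),("congelar","gelo"),("frio","gelo"),
   ("raio","raio"),("thunder","raio"),("trovao","raio"),("eletrico","raio"),("relampago","raio"),("rai","raio"),
   ("comecar","comecar"),("iniciar","comecar"),("start","comecar"),("jogar","comecar"),
   ("pontuacao","pontuacao"),("scores","pontuacao"),("placar","pontuacao"),
   ("voltar","voltar"),("menu","voltar"),("retornar","voltar"),
   ("parar","parar"),("stop","parar"),("sair","parar"),("quit","parar")]

-- A's inner loop: first synonym that is a substring of the word, yielding sinonimo_map[sinonimo]
def pvFindSyn (palavra : String) : List (String × String) → Option String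
  | [] => none
  | (s, c) :: rest => if PySem.Str.isIn s palavra then some c else pvFindSyn palavra rest

def process_voice_command (command : String) : List String :=
  if command = "" then []
  else
    (PySem.Str.split₀ (PySem.Str.lower command)).foldl
      (fun acc palavra =>
        match pvFindSyn palavra pvSinMap with
        | some c => acc ++ [c]
        | none => acc) []

-- ===== PORT B =====
def pvComandos : List (String × List String) :=
  [("fogo", ["fogo", "fire", "chama", "queimar"]),
   ("gelo", ["gelo", "ice", "congelar", "frio"]),
   ("raio", ["raio", "thunder", "trovao", "eletrico", "relampago", "rai"]),
   ("comecar", ["comecar", "iniciar", "start", "jogar"]),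
   ("pontuacao", ["pontuacao", "scores", "placar"]),
   ("voltar", ["voltar", "menu", "retornar"]),
   ("parar", ["parar", "stop", "sair", "quit"])]

-- Source B's module-level build loop: _PRIO (synonym → priority) and _CMDS (priority → command)
def pvPrioCmds : PySem.Dict String Int × List String :=
  pvComandos.foldl
    (fun st pr => pr.2.foldl
      (fun st s => (st.1.insert s (PySem.List.len st.2), st.2 ++ [pr.1])) st)
    (PySem.Dict.empty, [])

def pvPrio : PySem.Dict String Int := pvPrioCmds.1
def pvCmds : List String := pvPrioCmds.2

-- _MAXLEN = max(map(len, _PRIO)); _PRIO is nonempty, so the none branch is unreachable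
def pvMaxLen : Int :=
  match PySem.List.max? (pvPrio.keys.map PySem.Str.len) (fun x => x) with
  | some m => m
  | none => 0

-- Source B's nested substring loop: best = lowest priority found among the word's
-- substrings of length at most _MAXLEN
def pvBest (word : String) : Option Int :=
  (PySem.List.pyRange 0 (PySem.Str.len word) 1).foldl (fun best i =>
    (PySem.List.pyRange (i + 1) (min (i + pvMaxLen) (PySem.Str.len word) + 1) 1).foldl (fun best j =>
      match pvPrio.get? (PySem.Str.slice word (some i) (some j)) with
      | some p => match best with
                  | none => some p
                  | some b => if p < b then some p else some b
      | none => best) best) none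

def process_voice_command_alt (command : String) : List String :=
  (PySem.Str.split₀ (PySem.Str.lower command)).foldl
    (fun acc word =>
      match pvBest word with
      | some p =>
          -- _CMDS[best]: best is always a valid index, the none branch is unreachable
          match PySem.List.pyGet? pvCmds p with
          | some c => acc ++ [c]
          | none => acc
      | none => acc) []

-- ===== PRECONDITION & SPEC =====
def Spec_process_voice_command (command : String) (out : List String) : Prop := out = process_voice_command_alt command
instance (command : String) (out : List String) : Decidable (Spec_process_voice_command command out) := by unfold Spec_process_voice_command; infer_instance

-- ===== CLAIM (what is proved, stated in full; the proofs are below) =====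
def Claim_equal_process_voice_command : Prop := ∀ (command : String), Dom_process_voice_command command → Spec_process_voice_command command (process_voice_command command)

-- ===== LEMMAS AND PROOFS =====

-- the 28 (synonym, priority, command) triples both programs' tables are views of
def pvPairs : List (String × Int × String) :=
  [("fogo",0,"fogo"),("fire",1,"fogo"),("chama",2,"fogo"),("queimar",3,"fogo"),
   ("gelo",4,"gelo"),("ice",5,"gelo"),("congelar",6,"gelo"),("frio",7,"gelo"),
   ("raio",8,"raio"),("thunder",9,"raio"),("trovao",10,"raio"),("eletrico",11,"raio"),
   ("relampago",12,"raio"),("rai",13,"raio"),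
   ("comecar",14,"comecar"),("iniciar",15,"comecar"),("start",16,"comecar"),("jogar",17,"comecar"),
   ("pontuacao",18,"pontuacao"),("scores",19,"pontuacao"),("placar",20,"pontuacao"),
   ("voltar",21,"voltar"),("menu",22,"voltar"),("retornar",23,"voltar"),
   ("parar",24,"parar"),("stop",25,"parar"),("sair",26,"parar"),("quit",27,"parar")]

lemma pvSinMap_eq : pvSinMap = pvPairs.map (fun t => (t.1, t.2.2)) := by decide
lemma pvPrio_items : pvPrio.items = pvPairs.map (fun t => (t.1, t.2.1)) := by decide
lemma pvPrio_keys_nodup : pvPrio.keys.Nodup := by decide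
lemma pvPairs_incr : pvPairs.Pairwise (fun a b => a.2.1 < b.2.1) := by decide
lemma pvPairs_key_ne_nil : ∀ t ∈ pvPairs, t.1.toList ≠ [] := by decide
lemma pvCmds_at : ∀ t ∈ pvPairs, PySem.List.pyGet? pvCmds t.2.1 = some t.2.2 := by decide
lemma pvMaxLen_eq : pvMaxLen = 9 := by decide
lemma pvPairs_key_len : ∀ t ∈ pvPairs, t.1.toList.length ≤ 9 := by decide

-- option-min plumbing for B's running 'best'
def pvOmin : Option Int → Option Int → Option Int
  | none, b => b
  | some a, none => some a
  | some a, some b => some (min a b)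

def pvLmin : List Int → Option Int
  | [] => none
  | p :: t => pvOmin (some p) (pvLmin t)

lemma pvOmin_none_right (a : Option Int) : pvOmin a none = a := by cases a <;> rfl

lemma pvOmin_assoc (a b c : Option Int) : pvOmin (pvOmin a b) c = pvOmin a (pvOmin b c) := by
  cases a <;> cases b <;> cases c <;> simp [pvOmin, min_assoc]

lemma pvLmin_append (l₁ l₂ : List Int) :
    pvLmin (l₁ ++ l₂) = pvOmin (pvLmin l₁) (pvLmin l₂) := by
  induction l₁ with
  | nil => rfl
  | cons p t ih => simp [pvLmin, ih, pvOmin_assoc]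

lemma pvFoldl_omin {α : Type} (m : α → Option Int) :
    ∀ (L : List α) (b : Option Int),
      L.foldl (fun best x => pvOmin best (m x)) b = pvOmin b (pvLmin (L.filterMap m)) := by
  intro L
  induction L with
  | nil => intro b; simp [pvLmin, pvOmin_none_right]
  | cons x t ih =>
      intro b
      simp only [List.foldl_cons, List.filterMap_cons, ih]
      cases h : m x with
      | none => simp [pvOmin_none_right]
      | some p => simp [pvLmin, pvOmin_assoc]

lemma pvLmin_flat {α : Type} (g : α → List Int) :
    ∀ L : List α, pvLmin (L.filterMap (fun i => pvLmin (g i))) = pvLmin (L.flatMap g) := by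
  intro L
  induction L with
  | nil => rfl
  | cons x t ih =>
      simp only [List.filterMap_cons, List.flatMap_cons, pvLmin_append, ← ih]
      cases h : pvLmin (g x) with
      | none => rfl
      | some m => simp [pvLmin]

lemma pvLmin_mem : ∀ {l : List Int} {m : Int}, pvLmin l = some m → m ∈ l := by
  intro l
  induction l with
  | nil => intro m h; simp [pvLmin] at h
  | cons p t ih =>
      intro m h
      cases ht : pvLmin t with
      | none => simp [pvLmin, ht, pvOmin] at h; simp [h]
      | some q =>
          simp [pvLmin, ht, pvOmin] at h
          rcases min_cases p q with ⟨hm, _⟩ | ⟨hm, _⟩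
          · simp [← h, hm]
          · exact List.mem_cons_of_mem _ (ih (by rw [ht, ← h, hm]))

lemma pvLmin_eq_some_of {l : List Int} {a : Int} (h1 : a ∈ l) (h2 : ∀ b ∈ l, a ≤ b) :
    pvLmin l = some a := by
  induction l with
  | nil => simp at h1
  | cons p t ih =>
      rcases List.mem_cons.mp h1 with rfl | hmem
      · cases ht : pvLmin t with
        | none => simp [pvLmin, ht, pvOmin]
        | some q =>
            have hq : q ∈ t := pvLmin_mem ht
            have : a ≤ q := h2 q (List.mem_cons_of_mem _ hq)
            simp [pvLmin, ht, pvOmin, min_eq_left this]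
      · have ht : pvLmin t = some a := ih hmem (fun b hb => h2 b (List.mem_cons_of_mem _ hb))
        have hap : a ≤ p := h2 p (List.mem_cons_self ..)
        simp [pvLmin, ht, pvOmin, min_eq_right hap]

-- the flat list of all priorities B's nested loop looks up for one word
def pvCands (word : String) : List Int :=
  (PySem.List.pyRange 0 (PySem.Str.len word) 1).flatMap (fun i =>
    (PySem.List.pyRange (i + 1) (min (i + pvMaxLen) (PySem.Str.len word) + 1) 1).filterMap (fun j =>
      pvPrio.get? (PySem.Str.slice word (some i) (some j))))

lemma pvBest_eq_lmin (word : String) : pvBest word = pvLmin (pvCands word) := by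
  unfold pvBest pvCands
  have hbody : ∀ (best : Option Int) (i j : Int),
      (match pvPrio.get? (PySem.Str.slice word (some i) (some j)) with
        | some p => match best with
                    | none => some p
                    | some b => if p < b then some p else some b
        | none => best)
      = pvOmin best (pvPrio.get? (PySem.Str.slice word (some i) (some j))) := by
    intro best i j
    cases pvPrio.get? (PySem.Str.slice word (some i) (some j)) with
    | none => cases best <;> rfl
    | some p =>
        cases best with
        | none => rfl
        | some b =>
            simp only [pvOmin]
            rcases lt_or_ge p b with h | h
            · rw [if_pos h, min_eq_right h.le]
            · rw [if_neg (not_lt.mpr h), min_eq_left h]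
  calc (PySem.List.pyRange 0 (PySem.Str.len word) 1).foldl (fun best i =>
          (PySem.List.pyRange (i + 1) (min (i + pvMaxLen) (PySem.Str.len word) + 1) 1).foldl (fun best j =>
            match pvPrio.get? (PySem.Str.slice word (some i) (some j)) with
            | some p => match best with
                        | none => some p
                        | some b => if p < b then some p else some b
            | none => best) best) none
      = (PySem.List.pyRange 0 (PySem.Str.len word) 1).foldl (fun best i =>
          pvOmin best (pvLmin ((PySem.List.pyRange (i + 1) (min (i + pvMaxLen) (PySem.Str.len word) + 1) 1).filterMap
            (fun j => pvPrio.get? (PySem.Str.slice word (some i) (some j)))))) none := by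
        apply PySem.List.foldl_congr_mem
        intro best i _
        rw [show (fun (best : Option Int) j =>
              match pvPrio.get? (PySem.Str.slice word (some i) (some j)) with
              | some p => match best with
                          | none => some p
                          | some b => if p < b then some p else some b
              | none => best)
            = (fun best j => pvOmin best (pvPrio.get? (PySem.Str.slice word (some i) (some j))))
          from funext fun best => funext fun j => hbody best i j]
        exact pvFoldl_omin _ _ best
    _ = pvLmin _ := by
        rw [pvFoldl_omin (fun i => pvLmin ((PySem.List.pyRange (i + 1) (min (i + pvMaxLen) (PySem.Str.len word) + 1) 1).filterMap
              (fun j => pvPrio.get? (PySem.Str.slice word (some i) (some j)))))]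
        rw [pvLmin_flat]
        rfl

-- membership in the candidate list = some synonym is a substring of the word
lemma pvMem_cands (word : String) (p : Int) :
    p ∈ pvCands word ↔ ∃ t ∈ pvPairs, PySem.Str.isIn t.1 word = true ∧ p = t.2.1 := by
  have hget : ∀ (s : String) (q : Int), pvPrio.get? s = some q ↔ (s, q) ∈ pvPrio.items :=
    fun s q => PySem.Dict.get?_eq_some_iff_mem_items _ _ _ pvPrio_keys_nodup
  have hlen : PySem.Str.len word = (word.toList.length : Int) := by
    simp only [PySem.Str.len, String.length_toList]
  constructor
  · rintro hp
    rcases List.mem_flatMap.mp hp with ⟨i, hi, hp⟩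
    rcases List.mem_filterMap.mp hp with ⟨j, hj, hlook⟩
    rcases (PySem.List.mem_pyRange_one).mp hi with ⟨hi0, hin⟩
    rcases (PySem.List.mem_pyRange_one).mp hj with ⟨hji, hjn⟩
    rcases List.mem_map.mp (pvPrio_items ▸ (hget _ _).mp hlook) with ⟨t, htmem, hteq⟩
    rw [Prod.ext_iff] at hteq
    obtain ⟨ht1, ht2⟩ := hteq
    refine ⟨t, htmem, ?_, ht2.symm⟩
    rw [PySem.Str.isIn_iff_infix, ht1]
    have htl : (PySem.Str.slice word (some i) (some j)).toList
        = PySem.List.slice word.toList (some i) (some j) := by simp [pysem]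
    rw [htl, PySem.List.slice_toNat _ hi0 (by omega : (0:Int) ≤ j)]
    exact ((List.take_prefix _ _).isInfix).trans (List.drop_suffix _ _).isInfix
  · rintro ⟨t, htmem, hin, rfl⟩
    have hinf : t.1.toList <:+: word.toList := (PySem.Str.isIn_iff_infix _ _).mp hin
    rcases hinf with ⟨pre, suf, hw⟩
    have hne : t.1.toList ≠ [] := pvPairs_key_ne_nil t htmem
    have hlen' : word.toList.length = pre.length + t.1.toList.length + suf.length := by
      rw [← hw]; simp only [List.length_append]
    have htpos : 0 < t.1.toList.length := List.length_pos_iff.mpr hne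
    apply List.mem_flatMap.mpr
    refine ⟨(pre.length : Int), ?_, ?_⟩
    · rw [PySem.List.mem_pyRange_one, hlen]
      constructor
      · exact_mod_cast Nat.zero_le _
      · exact_mod_cast (by omega : pre.length < word.toList.length)
    · apply List.mem_filterMap.mpr
      refine ⟨(pre.length : Int) + (t.1.toList.length : Int), ?_, ?_⟩
      · rw [PySem.List.mem_pyRange_one, hlen, pvMaxLen_eq]
        have hkl : t.1.toList.length ≤ 9 := pvPairs_key_len t htmem
        constructor
        · exact_mod_cast (by omega : pre.length + 1 ≤ pre.length + t.1.toList.length)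
        · have h1 : (pre.length : Int) + (t.1.toList.length : Int) ≤ (pre.length : Int) + 9 := by
            exact_mod_cast (by omega : pre.length + t.1.toList.length ≤ pre.length + 9)
          have h2 : (pre.length : Int) + (t.1.toList.length : Int) ≤ (word.toList.length : Int) := by
            exact_mod_cast (by omega : pre.length + t.1.toList.length ≤ word.toList.length)
          omega
      · have hslice : PySem.Str.slice word (some (pre.length : Int))
            (some ((pre.length : Int) + (t.1.toList.length : Int))) = t.1 := by
          apply String.toList_inj.mp
          have h1 : (PySem.Str.slice word (some (pre.length : Int))
              (some ((pre.length : Int) + (t.1.toList.length : Int)))).toList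
              = PySem.List.slice word.toList (some (pre.length : Int))
                (some ((pre.length : Int) + (t.1.toList.length : Int))) := by simp [pysem]
          rw [h1, PySem.List.slice_natCast_add, ← hw, List.append_assoc, List.drop_left, List.take_left]
        rw [hslice]
        apply (hget _ _).mpr
        rw [pvPrio_items]
        exact List.mem_map.mpr ⟨t, htmem, rfl⟩

-- A's scan = head of the filtered triple list
lemma pvFindSyn_filter (word : String) :
    ∀ L : List (String × String),
      pvFindSyn word L = ((L.filter fun pr => PySem.Str.isIn pr.1 word).head?).map Prod.snd := by
  intro L
  induction L with
  | nil => rfl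
  | cons pr rest ih =>
      obtain ⟨s, c⟩ := pr
      unfold pvFindSyn
      rw [List.filter_cons]
      by_cases h : PySem.Str.isIn s word = true
      · rw [if_pos h, if_pos (by simpa using h)]; rfl
      · rw [if_neg h, if_neg (by simpa using h)]; exact ih

-- per-word agreement of the two matchers
lemma pvWord_eq (word : String) :
    pvFindSyn word pvSinMap
      = (pvBest word).bind (fun p => PySem.List.pyGet? pvCmds p) := by
  have hA : pvFindSyn word pvSinMap
      = ((pvPairs.filter fun t => PySem.Str.isIn t.1 word).head?).map (fun t => t.2.2) := by
    rw [pvFindSyn_filter, pvSinMap_eq, List.filter_map, List.head?_map, Option.map_map]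
    rfl
  rw [hA, pvBest_eq_lmin]
  cases hF : (pvPairs.filter fun t => PySem.Str.isIn t.1 word).head? with
  | none =>
      have hFnil : (pvPairs.filter fun t => PySem.Str.isIn t.1 word) = [] :=
        List.head?_eq_none_iff.mp hF
      have hcnil : pvCands word = [] := by
        apply List.eq_nil_iff_forall_not_mem.mpr
        intro p hp
        rcases (pvMem_cands word p).mp hp with ⟨t, htmem, hin, _⟩
        have : t ∈ (pvPairs.filter fun t => PySem.Str.isIn t.1 word) :=
          List.mem_filter.mpr ⟨htmem, hin⟩
        rw [hFnil] at this; simp at this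
      rw [hcnil]; rfl
  | some t₀ =>
      obtain ⟨rest, hFc⟩ : ∃ rest, (pvPairs.filter fun t => PySem.Str.isIn t.1 word) = t₀ :: rest := by
        cases hL : (pvPairs.filter fun t => PySem.Str.isIn t.1 word) with
        | nil => rw [hL] at hF; simp at hF
        | cons a l => rw [hL] at hF; simp at hF; exact ⟨l, by rw [hF]⟩
      have ht₀F : t₀ ∈ (pvPairs.filter fun t => PySem.Str.isIn t.1 word) := by
        rw [hFc]; exact List.mem_cons_self ..
      have ht₀mem : t₀ ∈ pvPairs := (List.mem_filter.mp ht₀F).1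
      have ht₀in : PySem.Str.isIn t₀.1 word = true := by
        simpa using (List.mem_filter.mp ht₀F).2
      have hlow : ∀ p ∈ pvCands word, t₀.2.1 ≤ p := by
        intro p hp
        rcases (pvMem_cands word p).mp hp with ⟨t, htmem, hin, rfl⟩
        have htF : t ∈ (pvPairs.filter fun t => PySem.Str.isIn t.1 word) :=
          List.mem_filter.mpr ⟨htmem, hin⟩
        rw [hFc] at htF
        rcases List.mem_cons.mp htF with rfl | hrest
        · exact le_refl _
        · have hpw : ∀ t' ∈ rest, t₀.2.1 < t'.2.1 := by
            have := pvPairs_incr.filter (fun t => PySem.Str.isIn t.1 word)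
            rw [hFc] at this
            exact (List.pairwise_cons.mp this).1
          exact (hpw _ hrest).le
      have hmemc : t₀.2.1 ∈ pvCands word :=
        (pvMem_cands word t₀.2.1).mpr ⟨t₀, ht₀mem, ht₀in, rfl⟩
      rw [pvLmin_eq_some_of hmemc hlow]
      simp [Option.bind, pvCmds_at t₀ ht₀mem]

-- ===== VERDICT (by name: the statement is the Claim_ definition above) =====
theorem process_voice_command_spec : Claim_equal_process_voice_command := by
  intro command _
  unfold Spec_process_voice_command process_voice_command process_voice_command_alt
  split
  · rename_i h
    subst h
    decide
  · apply PySem.List.foldl_congr_mem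
    intro acc word _
    rw [pvWord_eq]
    cases h : pvBest word with
    | none => rfl
    | some p => simp [Option.bind]
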